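-- pv_equiv track=rewrite | github.com/jmsenosa/topic-extractor | eb-mw-topic-extractor/acronymfinder.py | checkifsameletter
-- ===== SOURCE A (Python) =====
-- def checkifsameletter(acronym):
--     #checks if acronym is same letter (eg: PPP)
--     ch = {}
--     y = list(acronym)
--     for i in y:
--         try:
--             ch[i] = ch[i] + 1
--         except KeyError:
--             ch[i] = 1
--
--     if len(ch) == 1 and ch[acronym[0]] == len(acronym):
--         # print acronym, "> True"
--         return True
--     else:
--         # print acronym, "> False"
--         return False
-- ===== SOURCE B (Python) =====
-- def checkifsameletter(acronym):
--     #checks if acronym is same letter (eg: PPP)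
--     return len(acronym) > 0 and all(c == acronym[0] for c in acronym)
-- ===== Notes on version B (the rewrite author's own statement) =====
-- stated objective: idiomatic
-- what changed: B drops the frequency dictionary entirely and instead compares every character to the first with a short-circuiting all(), guarding the empty string by a length test.
import Mathlib
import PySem

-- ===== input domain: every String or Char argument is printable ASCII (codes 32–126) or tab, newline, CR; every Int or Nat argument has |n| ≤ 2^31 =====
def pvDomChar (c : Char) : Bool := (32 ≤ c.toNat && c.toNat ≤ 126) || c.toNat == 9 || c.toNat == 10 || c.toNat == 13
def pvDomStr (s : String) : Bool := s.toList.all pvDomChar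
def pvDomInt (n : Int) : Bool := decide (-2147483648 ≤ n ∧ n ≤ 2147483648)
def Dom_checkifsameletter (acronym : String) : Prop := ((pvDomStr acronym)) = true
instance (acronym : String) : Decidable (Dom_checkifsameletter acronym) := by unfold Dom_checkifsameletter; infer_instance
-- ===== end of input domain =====

-- B drops A's frequency dictionary and compares each character to the first with a short-circuiting all() (idiomatic; same cost).

-- ===== PORT A =====
def checkifsameletter (acronym : String) : Bool :=
  let y := acronym.toList
  let ch := y.foldl (fun d i =>
      match d.get? i with             -- try: ch[i] = ch[i] + 1 / except KeyError: ch[i] = 1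
      | some v => d.insert i (v + 1)
      | none   => d.insert i (1 : Int)) PySem.Dict.empty
  if ch.size = 1 then
    match PySem.Str.pyGet? acronym 0 with
    | some c => ch.getD c 0 == PySem.Str.len acronym
    | none   => false                 -- unreachable: ch.size = 1 forces a nonempty string, so acronym[0] exists and is a key of ch
  else false

-- ===== PORT B =====
def checkifsameletter_alt (acronym : String) : Bool :=
  match acronym.toList with           -- len(acronym) > 0 and all(c == acronym[0] for c in acronym)
  | []      => false
  | c :: cs => (c :: cs).all (fun x => x == c)

-- ===== PRECONDITION & SPEC =====
def Spec_checkifsameletter (acronym : String) (out : Bool) : Prop := out = checkifsameletter_alt acronym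
instance (acronym : String) (out : Bool) : Decidable (Spec_checkifsameletter acronym out) := by unfold Spec_checkifsameletter; infer_instance

-- ===== CLAIM (what is proved, stated in full; the proofs are below) =====
def Claim_equal_checkifsameletter : Prop := ∀ (acronym : String), Dom_checkifsameletter acronym → Spec_checkifsameletter acronym (checkifsameletter acronym)

-- ===== LEMMAS AND PROOFS =====

-- A's try/except counting step is exactly 'insert i (getD i 0 + 1)', so A's dict is Counter(acronym)
theorem step_eq :
    (fun (d : PySem.Dict Char Int) (i : Char) =>
      match d.get? i with
      | some v => d.insert i (v + 1)
      | none   => d.insert i (1 : Int)) =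
    (fun d i => d.insert i (d.getD i 0 + 1)) := by
  funext d i
  cases h : d.get? i with
  | some v => simp [PySem.Dict.getD_eq_get?_getD, h]
  | none   => simp [PySem.Dict.getD_eq_get?_getD, h]

-- A's 'len(ch) == 1' test says precisely that every later character equals the first
theorem ofList_length_one_iff (c : Char) (cs : List Char) :
    (PySem.Set.ofList (c :: cs)).length = 1 ↔ ∀ x ∈ cs, x = c := by
  rw [PySem.Set.ofList_cons]
  constructor
  · intro h x hx
    simp only [List.length_cons] at h
    have hnil : (PySem.Set.ofList cs).discard c = [] :=
      List.length_eq_zero_iff.mp (by omega)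
    by_contra hne
    have : x ∈ (PySem.Set.ofList cs).discard c := by
      rw [PySem.Set.mem_discard, PySem.Set.mem_ofList]; exact ⟨hx, hne⟩
    simp [hnil] at this
  · intro h
    have hnil : (PySem.Set.ofList cs).discard c = [] := by
      rw [List.eq_nil_iff_forall_not_mem]
      intro x hx
      rw [PySem.Set.mem_discard, PySem.Set.mem_ofList] at hx
      exact hx.2 (h x hx.1)
    simp [hnil]

theorem checkifsameletter_eq_alt (acronym : String) :
    checkifsameletter acronym = checkifsameletter_alt acronym := by
  unfold checkifsameletter checkifsameletter_alt
  dsimp only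
  rw [step_eq, PySem.Dict.foldl_insert_getD_add_one_eq_counter]
  cases hl : acronym.toList with
  | nil => simp [PySem.Dict.size, PySem.Dict.counter, PySem.Dict.empty]
  | cons c cs =>
    have hsize : (PySem.Dict.counter (c :: cs)).size = (PySem.Set.ofList (c :: cs)).length := by
      simp [PySem.Dict.size, PySem.Dict.items_counter]
    have hget : PySem.Str.pyGet? acronym 0 = some c := by
      simp [PySem.Str.pyGet?, hl]
    rw [hsize, hget]
    by_cases hall : ∀ x ∈ cs, x = c
    · have h1 : (PySem.Set.ofList (c :: cs)).length = 1 := (ofList_length_one_iff c cs).mpr hall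
      have hcount : (c :: cs).count c = (c :: cs).length := by
        rw [List.count_eq_length]; intro x hx
        rcases List.mem_cons.mp hx with h | h
        · exact (h ▸ rfl)
        · exact (hall x h) ▸ rfl
      simp [h1, PySem.Dict.getD_counter, hl, PySem.Str.len_eq, hcount]
      exact hall
    · have h1 : (PySem.Set.ofList (c :: cs)).length ≠ 1 := fun h => hall ((ofList_length_one_iff c cs).mp h)
      simp only [if_neg h1]
      symm
      rw [List.all_eq_false]
      push Not at hall
      obtain ⟨x, hx, hne⟩ := hall
      exact ⟨x, by simp [hx], by simp [hne]⟩

-- ===== VERDICT (by name: the statement is the Claim_ definition above) =====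
theorem checkifsameletter_spec : Claim_equal_checkifsameletter := by
  intro acronym _
  exact checkifsameletter_eq_alt acronym
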